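-- pv_equiv track=rewrite | github.com/biancofla/advent-of-code-2022 | day_6/solution.py | _compute_char_occurences
-- ===== SOURCE A (Python) =====
-- def _compute_char_occurences(data):
--     """
--         Compute occurrences for each string in a list.
--
--         Args:
--             * data (list): list containing strings.
--
--         Returns:
--             * (list): occurrences per string.
--     """
--     occurences = []
--
--     for string in data:
--         occurences_per_char = {}
--
--         for c in string:
--             if c not in occurences_per_char.keys():
--                 occurences_per_char[c] = 0
--             occurences_per_char[c] += 1
--
--         occurences.append(occurences_per_char)
--
--     return occurences
-- ===== SOURCE B (Python) =====
-- def _compute_char_occurences(data):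
--     """
--         Compute occurrences for each string in a list.
--
--         Simpler: for each string, take its distinct characters in first-occurrence
--         order (dict.fromkeys) and map each to string.count(c).
--     """
--     return [{c: string.count(c) for c in dict.fromkeys(string)}
--             for string in data]
-- ===== Notes on version B (the rewrite author's own statement) =====
-- stated objective: simpler
-- what changed: Replaces the nested accumulate-in-a-dict loops with a one-line comprehension: per string, dedupe the characters (dict.fromkeys, first-occurrence order) and set each character's count with str.count, so no mutable counting dict is threaded through the scan.
import Mathlib
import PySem

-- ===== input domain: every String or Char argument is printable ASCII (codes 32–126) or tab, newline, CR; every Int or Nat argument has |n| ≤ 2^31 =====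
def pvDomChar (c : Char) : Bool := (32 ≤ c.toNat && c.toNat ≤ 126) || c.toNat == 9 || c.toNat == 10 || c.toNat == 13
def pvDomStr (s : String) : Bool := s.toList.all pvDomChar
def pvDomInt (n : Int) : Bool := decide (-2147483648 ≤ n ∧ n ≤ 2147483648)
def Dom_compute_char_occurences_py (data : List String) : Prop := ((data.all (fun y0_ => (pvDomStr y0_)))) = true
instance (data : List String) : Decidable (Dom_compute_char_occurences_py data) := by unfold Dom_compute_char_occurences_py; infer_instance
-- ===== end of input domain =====

-- B replaces A's accumulate-in-a-dict scan by dedup-then-count (simpler decomposition, not faster).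

-- ===== PORT A =====
-- A: for each string build a dict by scanning its chars, initialising absent keys to 0 and incrementing.
def compute_char_occurences_py (data : List String) : List (List (String × Int)) :=
  data.foldl (fun occurences string =>
    let occurences_per_char :=
      string.toList.foldl (fun d c =>
        let k := String.ofList [c]
        let d1 := if d.contains k then d else d.insert k 0
        d1.insert k (d1.getD k 0 + 1)) PySem.Dict.empty
    occurences ++ [occurences_per_char.items]) []

-- ===== PORT B =====
-- B: per string, distinct chars in first-occurrence order (dict.fromkeys → PySem.List.dedup), each mapped to string.count(c).
def compute_char_occurences_py_alt (data : List String) : List (List (String × Int)) :=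
  data.map (fun string =>
    (PySem.List.dedup string.toList).map
      (fun c => (String.ofList [c], (PySem.Str.count string (String.ofList [c]) : Int))))

-- ===== PRECONDITION & SPEC =====
def Spec_compute_char_occurences_py (data : List String) (out : List (List (String × Int))) : Prop := out = compute_char_occurences_py_alt data
instance (data : List String) (out : List (List (String × Int))) : Decidable (Spec_compute_char_occurences_py data out) := by unfold Spec_compute_char_occurences_py; infer_instance

-- ===== CLAIM (what is proved, stated in full; the proofs are below) =====
def Claim_equal_compute_char_occurences_py : Prop := ∀ (data : List String), Dom_compute_char_occurences_py data → Spec_compute_char_occurences_py data (compute_char_occurences_py data)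

-- ===== LEMMAS AND PROOFS =====

-- str.count with a single-character needle is List.count of that character
theorem chars_count_go_singleton (c : Char) (l : List Char) (fuel acc : Nat)
    (h : l.length ≤ fuel) :
    PySem.Chars.count.go [c] fuel l acc = acc + l.count c := by
  induction l generalizing fuel acc with
  | nil => cases fuel <;> simp [PySem.Chars.count.go]
  | cons x t ih =>
    cases fuel with
    | zero => simp at h
    | succ f =>
      simp only [List.length_cons, Nat.succ_le_succ_iff] at h
      by_cases hx : x = c
      · subst hx
        simp [PySem.Chars.count.go, List.isPrefixOf, ih f (acc + 1) h]
        omega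
      · simp [PySem.Chars.count.go, List.isPrefixOf, hx, ih f acc h, Ne.symm hx]

theorem chars_count_singleton (l : List Char) (c : Char) :
    PySem.Chars.count l [c] = l.count c := by
  simp only [PySem.Chars.count, List.isEmpty_cons, Bool.false_eq_true, if_false]
  rw [chars_count_go_singleton c l l.length 0 le_rfl]
  simp

-- ofList commutes with an injective map
theorem set_ofList_map {α β : Type} [DecidableEq α] [DecidableEq β]
    (f : α → β) (hf : Function.Injective f) (l : List α) :
    PySem.Set.ofList (l.map f) = (PySem.Set.ofList l).map f := by
  suffices h : ∀ (acc : List α),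
      (l.map f).foldl PySem.Set.add (acc.map f) = (l.foldl PySem.Set.add acc).map f by
    simpa using h []
  induction l with
  | nil => intro acc; simp
  | cons x t ih =>
    intro acc
    by_cases hm : x ∈ acc
    · simpa [PySem.Set.add, List.mem_map_of_injective hf, hm] using ih acc
    · have := ih (acc ++ [x])
      simpa [PySem.Set.add, List.mem_map_of_injective hf, hm] using this

theorem mk_singleton_injective : Function.Injective (fun c : Char => String.ofList [c]) := by
  intro a b h
  have := congrArg String.toList h
  simpa using this

-- A's inner step is the counting insert
theorem stepA_eq (d : PySem.Dict String Int) (k : String) :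
    (let d1 := if d.contains k then d else d.insert k 0
     d1.insert k (d1.getD k 0 + 1)) = d.insert k (d.getD k 0 + 1) := by
  by_cases h : d.contains k = true
  · simp [h]
  · simp only [Bool.not_eq_true] at h
    simp [h, PySem.Dict.insert_insert_self, PySem.Dict.getD_insert_self,
      PySem.Dict.getD_of_not_contains d 0 h]

-- A's per-string dict items are B's per-string list
theorem per_string_eq (s : String) :
    (s.toList.foldl (fun d c =>
        let k := String.ofList [c]
        let d1 := if d.contains k then d else d.insert k 0
        d1.insert k (d1.getD k 0 + 1)) PySem.Dict.empty).items
    = (PySem.List.dedup s.toList).map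
        (fun c => (String.ofList [c], (PySem.Str.count s (String.ofList [c]) : Int))) := by
  have h1 : s.toList.foldl (fun d c =>
        let k := String.ofList [c]
        let d1 := if d.contains k then d else d.insert k 0
        d1.insert k (d1.getD k 0 + 1)) PySem.Dict.empty
      = (s.toList.map (fun c => String.ofList [c])).foldl
          (fun d k => d.insert k (d.getD k (0 : Int) + 1)) PySem.Dict.empty := by
    rw [List.foldl_map]
    exact PySem.List.foldl_congr_mem _ _ _ _ (fun d c _ => stepA_eq d (String.ofList [c]))
  rw [h1, PySem.Dict.foldl_insert_getD_add_one_eq_counter, PySem.Dict.items_counter,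
    set_ofList_map _ mk_singleton_injective, List.map_map]
  refine List.map_congr_left (fun c hc => ?_)
  simp [PySem.Str.count, chars_count_singleton,
    List.count_map_of_injective _ _ mk_singleton_injective]

-- ===== VERDICT (by name: the statement is the Claim_ definition above) =====
theorem compute_char_occurences_py_spec : Claim_equal_compute_char_occurences_py := by
  intro data _
  unfold Spec_compute_char_occurences_py compute_char_occurences_py compute_char_occurences_py_alt
  rw [PySem.List.foldl_append_singleton_eq_map]
  simp only [List.nil_append]
  exact List.map_congr_left (fun s _ => per_string_eq s)
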